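-- pv_equiv track=rewrite | github.com/VenciFreeman/personal-rag-dashboard | nav_dashboard/web/services/media_query_adapter.py | project_creator_role_fields
-- ===== SOURCE A (Python) =====
-- from typing import Any, Literal
--
-- def normalize_filter_map(value: Any) -> dict[str, list[str]]:
--     if not isinstance(value, dict):
--         return {}
--     normalized: dict[str, list[str]] = {}
--     for key, raw_values in value.items():
--         field_name = str(key or "").strip()
--         if not field_name:
--             continue
--         if isinstance(raw_values, list):
--             values = [str(item).strip() for item in raw_values if str(item).strip()]
--         else:
--             values = [str(raw_values).strip()] if str(raw_values).strip() else []
--         if values: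
--             normalized[field_name] = values
--     return normalized
--
-- def _merge_unique(base: dict[str, list[str]], field: str, values: list[str]) -> None:
--     clean_values = [str(value).strip() for value in values if str(value).strip()]
--     if not clean_values:
--         return
--     existing = [str(value).strip() for value in base.get(field, []) if str(value).strip()]
--     seen = {value.casefold() for value in existing}
--     for value in clean_values:
--         folded = value.casefold()
--         if folded in seen:
--             continue
--         seen.add(folded)
--         existing.append(value)
--     if existing:
--         base[field] = existing
--
-- _CREATOR_ROLE_TO_AUTHOR: dict[str, str] = {
--     # video roles
--     "director":     "author",
--     "directors":    "author",
--     # music roles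
--     "composer":     "author",
--     "composers":    "author",
--     "performer":    "author",
--     "performers":   "author",
--     "artist":       "author",
--     "artists":      "author",
--     "band":         "author",
--     # book roles
--     "writer":       "author",
--     "writers":      "author",
--     "illustrator":  "author",
--     "illustrators": "author",
--     # game roles
--     "developer":    "author",
--     "developers":   "author",
--     "studio":       "author",
--     "studios":      "author",
--     # generic
--     "creator":      "author",
--     "creators":     "author",
--     "producer":     "author",
--     "producers":    "author",
-- }
--
-- def project_creator_role_fields(
--     filters: dict[str, list[str]] | None,
-- ) -> tuple[dict[str, list[str]], list[str]]:
--     """Remap semantic creator-role fields (director/composer/…) to 'author'.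
--
--     Returns:
--         (projected_filters, repairs)  where repairs lists each remapping made.
--     """
--     normalized = normalize_filter_map(filters)
--     result: dict[str, list[str]] = {}
--     repairs: list[str] = []
--     for field_name, values in normalized.items():
--         target = _CREATOR_ROLE_TO_AUTHOR.get(field_name.lower())
--         if target:
--             repairs.append(f"{field_name}->{target}")
--             _merge_unique(result, target, values)
--         else:
--             _merge_unique(result, field_name, values)
--     return result, repairs
-- ===== SOURCE B (Python) =====
-- _CREATOR_ROLE_TO_AUTHOR = {
--     "director":     "author",
--     "directors":    "author",
--     "composer":     "author",
--     "composers":    "author",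
--     "performer":    "author",
--     "performers":   "author",
--     "artist":       "author",
--     "artists":      "author",
--     "band":         "author",
--     "writer":       "author",
--     "writers":      "author",
--     "illustrator":  "author",
--     "illustrators": "author",
--     "developer":    "author",
--     "developers":   "author",
--     "studio":       "author",
--     "studios":      "author",
--     "creator":      "author",
--     "creators":     "author",
--     "producer":     "author",
--     "producers":    "author",
-- }
--
--
-- def _clean(values):
--     out = []
--     for item in values:
--         s = str(item).strip()
--         if s:
--             out.append(s)
--     return out
--
--
-- def _dedup_casefold(values):
--     seen = set()
--     out = []
--     for value in values:
--         c = value.casefold()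
--         if c not in seen:
--             seen.add(c)
--             out.append(value)
--     return out
--
--
-- def _normalize(filters):
--     normalized = {}
--     if isinstance(filters, dict):
--         for key, raw in filters.items():
--             field = str(key or "").strip()
--             vals = _clean(raw) if isinstance(raw, list) else _clean([raw])
--             if field and vals:
--                 normalized[field] = vals
--     return normalized
--
--
-- def project_creator_role_fields(filters):
--     """Staged pipeline: normalize, rename fields, collect repairs, group the
--     values per output field by plain concatenation, then dedup each bucket once
--     at the end (instead of merging/deduplicating incrementally per input field)."""
--     normalized = _normalize(filters)
--     mapped = [(_CREATOR_ROLE_TO_AUTHOR.get(f.lower()) or f, vs)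
--               for f, vs in normalized.items()]
--     repairs = [f"{f}->{t}" for f in normalized
--                for t in [_CREATOR_ROLE_TO_AUTHOR.get(f.lower())] if t]
--     groups = {}
--     for f, vs in mapped:
--         groups.setdefault(f, []).extend(vs)
--     return {f: _dedup_casefold(vs) for f, vs in groups.items()}, repairs
-- ===== Notes on version B (the rewrite author's own statement) =====
-- stated objective: alternative
-- what changed: Replaces A's single fused loop that merges each field into the result via _merge_unique (re-stripping and re-deduplicating the existing bucket on every step) with a staged pipeline: rename fields and collect repairs with comprehensions, group values per output field by plain concatenation, then casefold-dedup each bucket once at the end.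
import Mathlib
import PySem

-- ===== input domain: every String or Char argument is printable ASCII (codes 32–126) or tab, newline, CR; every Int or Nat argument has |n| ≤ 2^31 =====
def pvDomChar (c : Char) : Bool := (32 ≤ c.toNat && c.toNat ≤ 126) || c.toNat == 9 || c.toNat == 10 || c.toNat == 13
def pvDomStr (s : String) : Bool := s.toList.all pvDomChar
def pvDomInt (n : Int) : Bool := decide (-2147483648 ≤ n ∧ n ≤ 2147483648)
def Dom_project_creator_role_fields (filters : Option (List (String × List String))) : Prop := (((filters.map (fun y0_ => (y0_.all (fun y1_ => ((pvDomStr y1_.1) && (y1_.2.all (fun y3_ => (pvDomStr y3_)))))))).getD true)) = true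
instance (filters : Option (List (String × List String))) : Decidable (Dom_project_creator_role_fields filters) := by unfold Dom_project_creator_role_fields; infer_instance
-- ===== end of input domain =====

-- B replaces A's fused loop (which merges every field into the result via _merge_unique,
-- re-stripping and re-deduplicating the existing bucket each time) by a staged pipeline:
-- rename fields / collect repairs, group values per output field by concatenation, then
-- casefold-dedup each bucket once at the end (objective: alternative, same observable result).
-- 'str.casefold()' and 'str.lower()' are ported as PySem.Str.lower — exact on the ASCII input domain.

-- the module-level constant _CREATOR_ROLE_TO_AUTHOR (shared data, used by both ports)
def pvCreatorRoleToAuthor : PySem.Dict String String := PySem.Dict.ofList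
  [("director", "author"), ("directors", "author"),
   ("composer", "author"), ("composers", "author"),
   ("performer", "author"), ("performers", "author"),
   ("artist", "author"), ("artists", "author"),
   ("band", "author"),
   ("writer", "author"), ("writers", "author"),
   ("illustrator", "author"), ("illustrators", "author"),
   ("developer", "author"), ("developers", "author"),
   ("studio", "author"), ("studios", "author"),
   ("creator", "author"), ("creators", "author"),
   ("producer", "author"), ("producers", "author")]

-- ===== PORT A =====
-- '[str(x).strip() for x in l if str(x).strip()]' elementwise: strip once, keep if nonempty
def pvStripKeep? (s : String) : Option String :=
  if PySem.Str.strip s = "" then none else some (PySem.Str.strip s)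

-- normalize_filter_map; the argument is typed dict[str, list[str]] | None, so isinstance checks
-- reduce to the Option match and the list branch; str(key or "").strip() = key.strip() for a str key
def pvNormalizeA (value : Option (List (String × List String))) : PySem.Dict String (List String) :=
  match value with
  | none => PySem.Dict.empty
  | some items =>
    items.foldl (fun normalized kv =>
      if PySem.Str.strip kv.1 = "" then normalized
      else if kv.2.filterMap pvStripKeep? = [] then normalized
      else normalized.insert (PySem.Str.strip kv.1) (kv.2.filterMap pvStripKeep?))
      PySem.Dict.empty

-- _merge_unique (mutates base in Python; ported as returning the updated dict)
def pvMergeUnique (base : PySem.Dict String (List String)) (field : String) (values : List String) :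
    PySem.Dict String (List String) :=
  if values.filterMap pvStripKeep? = [] then base
  else
    let st := (values.filterMap pvStripKeep?).foldl
      (fun (st : PySem.Set String × List String) value =>
        if PySem.Set.contains st.1 (PySem.Str.lower value) then st
        else (PySem.Set.add st.1 (PySem.Str.lower value), st.2 ++ [value]))
      (PySem.Set.ofList (((PySem.Dict.getD base field []).filterMap pvStripKeep?).map PySem.Str.lower),
       (PySem.Dict.getD base field []).filterMap pvStripKeep?)
    if st.2 = [] then base else PySem.Dict.insert base field st.2

def project_creator_role_fields (filters : Option (List (String × List String))) : (List (String × List String)) × List String :=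
  let normalized := pvNormalizeA filters
  let st := normalized.items.foldl
    (fun (st : PySem.Dict String (List String) × List String) fv =>
      -- target = _CREATOR_ROLE_TO_AUTHOR.get(field_name.lower()); 'if target:' — values are "author", always truthy
      match PySem.Dict.get? pvCreatorRoleToAuthor (PySem.Str.lower fv.1) with
      | some target => (pvMergeUnique st.1 target fv.2, st.2 ++ [fv.1 ++ "->" ++ target])
      | none => (pvMergeUnique st.1 fv.1 fv.2, st.2))
    (PySem.Dict.empty, [])
  (st.1.items, st.2)

-- ===== PORT B =====
-- _clean: explicit append loop
def pvCleanListB (values : List String) : List String :=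
  values.foldl (fun out item =>
    if PySem.Str.strip item = "" then out else out ++ [PySem.Str.strip item]) []

-- _normalize: the argument is typed dict | None, so only the dict branch and the list branch fire
def pvNormalizeB (filters : Option (List (String × List String))) : PySem.Dict String (List String) :=
  match filters with
  | none => PySem.Dict.empty
  | some items =>
    items.foldl (fun normalized kv =>
      if PySem.Str.strip kv.1 ≠ "" ∧ pvCleanListB kv.2 ≠ [] then
        normalized.insert (PySem.Str.strip kv.1) (pvCleanListB kv.2)
      else normalized)
      PySem.Dict.empty

-- _dedup_casefold: one pass with a 'seen' set of casefolded values
def pvDedupCasefold (values : List String) : List String :=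
  (values.foldl (fun (st : List String × PySem.Set String) value =>
      if PySem.Set.contains st.2 (PySem.Str.lower value) then st
      else (st.1 ++ [value], PySem.Set.add st.2 (PySem.Str.lower value)))
    ([], PySem.Set.empty)).1

def project_creator_role_fields_alt (filters : Option (List (String × List String))) : (List (String × List String)) × List String :=
  let normalized := pvNormalizeB filters
  -- '_CREATOR_ROLE_TO_AUTHOR.get(f.lower()) or f': every stored target is "author" (truthy), so 'or' is Option.getD
  let mapped := normalized.items.map (fun fv =>
    ((PySem.Dict.get? pvCreatorRoleToAuthor (PySem.Str.lower fv.1)).getD fv.1, fv.2))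
  let repairs := normalized.items.filterMap (fun fv =>
    (PySem.Dict.get? pvCreatorRoleToAuthor (PySem.Str.lower fv.1)).map (fun t => fv.1 ++ "->" ++ t))
  let groups := mapped.foldl (fun (g : PySem.Dict String (List String)) fv =>
    g.insert fv.1 (g.getD fv.1 [] ++ fv.2)) PySem.Dict.empty
  -- the dict comprehension: groups' keys are already unique, so it is a map over its items
  (groups.items.map (fun p => (p.1, pvDedupCasefold p.2)), repairs)

-- ===== PRECONDITION & SPEC =====
def Spec_project_creator_role_fields (filters : Option (List (String × List String))) (out : (List (String × List String)) × List String) : Prop := out = project_creator_role_fields_alt filters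
instance (filters : Option (List (String × List String))) (out : (List (String × List String)) × List String) : Decidable (Spec_project_creator_role_fields filters out) := by unfold Spec_project_creator_role_fields; infer_instance

-- ===== CLAIM (what is proved, stated in full; the proofs are below) =====
def Claim_equal_project_creator_role_fields : Prop := ∀ (filters : Option (List (String × List String))), Dom_project_creator_role_fields filters → Spec_project_creator_role_fields filters (project_creator_role_fields filters)

-- ===== LEMMAS AND PROOFS =====

-- a string that survives normalization: already stripped and nonempty
def pvClean (s : String) : Prop := PySem.Str.strip s = s ∧ s ≠ ""

theorem pvDropWhile_rdrop_drop {α : Type} (p : α → Bool) (l : List α) :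
    List.dropWhile p (List.rdropWhile p (List.dropWhile p l)) = List.rdropWhile p (List.dropWhile p l) := by
  cases h : List.rdropWhile p (List.dropWhile p l) with
  | nil => simp
  | cons a as =>
    have hpre := List.rdropWhile_prefix p (List.dropWhile p l)
    rw [h] at hpre
    obtain ⟨u, hu⟩ := hpre
    have hhead := List.head?_dropWhile_not p l
    rw [← hu] at hhead
    simp at hhead
    simp [hhead]

theorem pvChars_strip_idem (cs : List Char) : PySem.Chars.strip (PySem.Chars.strip cs) = PySem.Chars.strip cs := by
  have hr : ∀ t : List Char, PySem.Chars.rstrip t = List.rdropWhile PySem.Chars.isspace t := fun _ => rfl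
  show PySem.Chars.rstrip (PySem.Chars.lstrip (PySem.Chars.rstrip (PySem.Chars.lstrip cs))) = _
  rw [hr, hr]
  show List.rdropWhile _ (List.dropWhile _ (List.rdropWhile _ (List.dropWhile _ cs))) = _
  rw [pvDropWhile_rdrop_drop, List.rdropWhile_idempotent]
  rfl

theorem pvStr_strip_idem (s : String) : PySem.Str.strip (PySem.Str.strip s) = PySem.Str.strip s := by
  show String.ofList (PySem.Chars.strip (String.ofList (PySem.Chars.strip s.toList)).toList) = _
  rw [String.toList_ofList, pvChars_strip_idem]
  rfl

theorem pvStripKeep?_of_clean (s : String) (h : pvClean s) : pvStripKeep? s = some s := by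
  simp [pvStripKeep?, h.1, h.2]

theorem pvClean_of_stripKeep? (a v : String) (h : pvStripKeep? a = some v) : pvClean v := by
  unfold pvStripKeep? at h
  split at h
  · exact absurd h (by simp)
  · have hv : v = PySem.Str.strip a := (Option.some.inj h).symm
    exact hv ▸ ⟨pvStr_strip_idem a, by assumption⟩

theorem pvFilterMap_clean (l : List String) (h : ∀ v ∈ l, pvClean v) :
    l.filterMap pvStripKeep? = l := by
  induction l with
  | nil => rfl
  | cons a t ih =>
    rw [List.filterMap_cons, pvStripKeep?_of_clean a (h a (by simp)),
      ih (fun v hv => h v (by simp [hv]))]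

-- B's _clean computes the same list as A's comprehension
theorem pvCleanListB_eq (l : List String) : pvCleanListB l = l.filterMap pvStripKeep? := by
  have key : ∀ (acc : List String),
      l.foldl (fun out item =>
        if PySem.Str.strip item = "" then out else out ++ [PySem.Str.strip item]) acc
        = acc ++ l.filterMap pvStripKeep? := by
    induction l with
    | nil => intro acc; simp
    | cons a t ih =>
      intro acc
      rw [List.foldl_cons, List.filterMap_cons]
      by_cases h : PySem.Str.strip a = ""
      · have ha : pvStripKeep? a = none := by simp [pvStripKeep?, h]
        rw [ha, if_pos h, ih acc]
      · have ha : pvStripKeep? a = some (PySem.Str.strip a) := by simp [pvStripKeep?, h]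
        rw [ha, if_neg h, ih (acc ++ [PySem.Str.strip a])]
        simp
  simpa using key []

-- the two normalizations agree
theorem pvNormalize_eq (filters : Option (List (String × List String))) :
    pvNormalizeB filters = pvNormalizeA filters := by
  cases filters with
  | none => rfl
  | some l =>
    show l.foldl _ PySem.Dict.empty = l.foldl _ PySem.Dict.empty
    congr 1
    funext d kv
    rw [pvCleanListB_eq]
    by_cases h1 : PySem.Str.strip kv.1 = "" <;>
      by_cases h2 : kv.2.filterMap pvStripKeep? = [] <;>
      simp [h1, h2]

theorem pvNorm_items (filters : Option (List (String × List String))) :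
    ∀ p ∈ (pvNormalizeA filters).items, p.2 ≠ [] ∧ ∀ v ∈ p.2, pvClean v := by
  cases filters with
  | none => intro p hp; simp [pvNormalizeA, PySem.Dict.empty] at hp
  | some l =>
    show ∀ p ∈ (l.foldl _ PySem.Dict.empty).items, _
    have key : ∀ (d : PySem.Dict String (List String)),
        (∀ p ∈ d.items, p.2 ≠ [] ∧ ∀ v ∈ p.2, pvClean v) →
        ∀ p ∈ (l.foldl (fun normalized kv =>
          if PySem.Str.strip kv.1 = "" then normalized
          else if kv.2.filterMap pvStripKeep? = [] then normalized
          else normalized.insert (PySem.Str.strip kv.1) (kv.2.filterMap pvStripKeep?)) d).items,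
          p.2 ≠ [] ∧ ∀ v ∈ p.2, pvClean v := by
      induction l with
      | nil => intro d hd; exact hd
      | cons kv t ih =>
        intro d hd
        rw [List.foldl_cons]
        apply ih
        split
        · exact hd
        · split
          · exact hd
          · intro p hp
            rw [PySem.Dict.mem_items_insert] at hp
            rcases hp with hp | hp
            · subst hp
              refine ⟨by assumption, fun v hv => ?_⟩
              obtain ⟨a, _, ha⟩ := List.mem_filterMap.mp hv
              exact pvClean_of_stripKeep? a v ha
            · exact hd p hp.1
    exact key PySem.Dict.empty (by intro p hp; simp [PySem.Dict.empty] at hp)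

-- proof-side names for the loop bodies (definitionally equal to the lambdas in the ports)
def pvDedupStepA (st : PySem.Set String × List String) (value : String) : PySem.Set String × List String :=
  if PySem.Set.contains st.1 (PySem.Str.lower value) then st
  else (PySem.Set.add st.1 (PySem.Str.lower value), st.2 ++ [value])

def pvDedupStep (bf : List String × PySem.Set String) (value : String) : List String × PySem.Set String :=
  if PySem.Set.contains bf.2 (PySem.Str.lower value) then bf
  else (bf.1 ++ [value], PySem.Set.add bf.2 (PySem.Str.lower value))

-- full casefold-dedup, B's _dedup_casefold from an empty start
def pvDedup (l : List String) : List String :=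
  (l.foldl pvDedupStep ([], PySem.Set.empty)).1

def pvStepA (st : PySem.Dict String (List String) × List String) (fv : String × List String) :
    PySem.Dict String (List String) × List String :=
  match PySem.Dict.get? pvCreatorRoleToAuthor (PySem.Str.lower fv.1) with
  | some target => (pvMergeUnique st.1 target fv.2, st.2 ++ [fv.1 ++ "->" ++ target])
  | none => (pvMergeUnique st.1 fv.1 fv.2, st.2)

-- B's group step, precomposed with the field-renaming map
def pvOutName (f : String) : String :=
  (PySem.Dict.get? pvCreatorRoleToAuthor (PySem.Str.lower f)).getD f

def pvStepG (g : PySem.Dict String (List String)) (fv : String × List String) :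
    PySem.Dict String (List String) :=
  g.insert (pvOutName fv.1) (g.getD (pvOutName fv.1) [] ++ fv.2)

def pvRepair (fv : String × List String) : Option String :=
  (PySem.Dict.get? pvCreatorRoleToAuthor (PySem.Str.lower fv.1)).map (fun t => fv.1 ++ "->" ++ t)

def pvDM (p : String × List String) : String × List String := (p.1, pvDedup p.2)

theorem pvDedupStep_eq (bf : List String × PySem.Set String) (v : String) :
    pvDedupStep bf v = if PySem.Set.contains bf.2 (PySem.Str.lower v) then bf
      else (bf.1 ++ [v], PySem.Set.add bf.2 (PySem.Str.lower v)) := rfl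

theorem pvDedup_swap (l : List String) (s : PySem.Set String) (e : List String) :
    l.foldl pvDedupStepA (s, e) =
      ((l.foldl pvDedupStep (e, s)).2, (l.foldl pvDedupStep (e, s)).1) := by
  induction l generalizing s e with
  | nil => rfl
  | cons v t ih =>
    simp only [List.foldl_cons, pvDedupStepA, pvDedupStep]
    split
    · exact ih s e
    · exact ih _ _

theorem pvDedup_inv (l : List String) (e : List String) (s : PySem.Set String)
    (h : s = PySem.Set.ofList (e.map PySem.Str.lower)) :
    (l.foldl pvDedupStep (e, s)).2 =
      PySem.Set.ofList ((l.foldl pvDedupStep (e, s)).1.map PySem.Str.lower) := by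
  induction l generalizing e s with
  | nil => exact h
  | cons v t ih =>
    simp only [List.foldl_cons, pvDedupStep]
    split
    · exact ih e s h
    · refine ih (e ++ [v]) _ ?_
      rw [h, PySem.Set.ofList_eq_foldl, PySem.Set.ofList_eq_foldl, List.map_append,
        List.foldl_append]
      rfl

theorem pvDedup_mem (l : List String) (e : List String) (s : PySem.Set String) :
    ∀ x ∈ (l.foldl pvDedupStep (e, s)).1, x ∈ e ∨ x ∈ l := by
  induction l generalizing e s with
  | nil => intro x hx; exact Or.inl hx
  | cons v t ih =>
    intro x hx
    rw [List.foldl_cons] at hx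
    unfold pvDedupStep at hx
    split at hx
    · rcases ih e s x hx with h | h
      · exact Or.inl h
      · exact Or.inr (by simp [h])
    · rcases ih (e ++ [v]) _ x hx with h | h
      · rcases List.mem_append.mp h with h | h
        · exact Or.inl h
        · exact Or.inr (by simp at h; simp [h])
      · exact Or.inr (by simp [h])

theorem pvDedup_prefix (l : List String) (e : List String) (s : PySem.Set String) :
    ∃ t, (l.foldl pvDedupStep (e, s)).1 = e ++ t := by
  induction l generalizing e s with
  | nil => exact ⟨[], by simp⟩
  | cons v t ih =>
    rw [List.foldl_cons, pvDedupStep_eq]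
    split
    · exact ih e s
    · obtain ⟨u, hu⟩ := ih (e ++ [v]) (PySem.Set.add s (PySem.Str.lower v))
      exact ⟨v :: u, by rw [hu]; simp⟩

theorem pvDedup_ne_nil (l : List String) (e : List String) (s : PySem.Set String)
    (hl : l ≠ []) (h : s = PySem.Set.ofList (e.map PySem.Str.lower)) :
    (l.foldl pvDedupStep (e, s)).1 ≠ [] := by
  cases e with
  | cons a t =>
    obtain ⟨u, hu⟩ := pvDedup_prefix l (a :: t) s
    simp [hu]
  | nil =>
    cases l with
    | nil => exact absurd rfl hl
    | cons v t =>
      have hs : s = PySem.Set.empty := by simpa using h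
      subst hs
      rw [List.foldl_cons]
      have hstep : pvDedupStep ([], PySem.Set.empty) v =
          ([v], PySem.Set.add PySem.Set.empty (PySem.Str.lower v)) := by
        simp [pvDedupStep, PySem.Set.contains, PySem.Set.empty]
      rw [hstep]
      obtain ⟨u, hu⟩ := pvDedup_prefix t [v] (PySem.Set.add PySem.Set.empty (PySem.Str.lower v))
      rw [hu]; simp

-- get? through a value-map of the items list
theorem pvGet?_map_items (g : List String → List String) (l : List (String × List String)) (k : String) :
    (PySem.Dict.mk (l.map (fun p => (p.1, g p.2)))).get? k
      = ((PySem.Dict.mk l).get? k).map g := by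
  induction l with
  | nil => rfl
  | cons p t ih =>
    rw [List.map_cons]
    rw [show ((p.1, g p.2) :: t.map (fun p => (p.1, g p.2))) =
      ((p.1, g p.2) :: t.map (fun p => (p.1, g p.2))) from rfl]
    rw [PySem.Dict.get?_mk_cons, PySem.Dict.get?_mk_cons]
    split
    · rfl
    · exact ih

theorem pvGetD_of_rel (R G : PySem.Dict String (List String))
    (h : R.items = G.items.map pvDM) (k : String) :
    PySem.Dict.getD R k [] = pvDedup (PySem.Dict.getD G k []) := by
  have h1 : R = PySem.Dict.mk (G.items.map (fun p => (p.1, pvDedup p.2))) := PySem.Dict.ext h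
  have h2 := pvGet?_map_items pvDedup G.items k
  rw [PySem.Dict.getD_eq_get?_getD, PySem.Dict.getD_eq_get?_getD, h1, h2]
  cases hg : (PySem.Dict.mk G.items).get? k with
  | none => rfl
  | some v => rfl

theorem pvKeys_of_rel (R G : PySem.Dict String (List String))
    (h : R.items = G.items.map pvDM) : R.keys = G.keys := by
  show R.items.map (fun p => p.1) = G.items.map (fun p => p.1)
  rw [h, List.map_map]
  rfl

-- the key step: a _merge_unique into R corresponds to concat-into-G followed by a final dedup
theorem pvMergeStep (R G : PySem.Dict String (List String)) (f : String) (vs : List String)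
    (hvs : vs ≠ []) (hcv : ∀ v ∈ vs, pvClean v)
    (hRG : R.items = G.items.map pvDM)
    (hG : ∀ k, ∀ v ∈ PySem.Dict.getD G k [], pvClean v) :
    (pvMergeUnique R f vs).items
        = (G.insert f (PySem.Dict.getD G f [] ++ vs)).items.map pvDM ∧
    (∀ k, ∀ v ∈ PySem.Dict.getD (G.insert f (PySem.Dict.getD G f [] ++ vs)) k [], pvClean v) := by
  set old := PySem.Dict.getD G f [] with hold
  have holdclean : ∀ v ∈ old, pvClean v := hG f
  have hRf : PySem.Dict.getD R f [] = pvDedup old := pvGetD_of_rel R G hRG f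
  have hdc : ∀ v ∈ pvDedup old, pvClean v := by
    intro v hv
    rcases pvDedup_mem old [] PySem.Set.empty v hv with h | h
    · simp at h
    · exact holdclean v h
  have h1 : vs.filterMap pvStripKeep? = vs := pvFilterMap_clean vs hcv
  have h2 : (PySem.Dict.getD R f []).filterMap pvStripKeep? = pvDedup old := by
    rw [hRf]; exact pvFilterMap_clean _ hdc
  have hsnd : (old.foldl pvDedupStep ([], PySem.Set.empty)).2
      = PySem.Set.ofList ((pvDedup old).map PySem.Str.lower) :=
    pvDedup_inv old [] PySem.Set.empty (by simp)
  have hpair : ((pvDedup old, PySem.Set.ofList ((pvDedup old).map PySem.Str.lower)) :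
      List String × PySem.Set String) = old.foldl pvDedupStep ([], PySem.Set.empty) := by
    rw [← hsnd]
    rfl
  have hfold : vs.foldl pvDedupStepA
      (PySem.Set.ofList ((pvDedup old).map PySem.Str.lower), pvDedup old)
      = (((old ++ vs).foldl pvDedupStep ([], PySem.Set.empty)).2, pvDedup (old ++ vs)) := by
    rw [pvDedup_swap, hpair, ← List.foldl_append]
    rfl
  have hne : pvDedup (old ++ vs) ≠ [] :=
    pvDedup_ne_nil (old ++ vs) [] PySem.Set.empty (by simp [hvs]) (by simp)
  have hA : pvMergeUnique R f vs
      = (if pvDedup (old ++ vs) = [] then R else R.insert f (pvDedup (old ++ vs))) := by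
    unfold pvMergeUnique
    rw [h1, if_neg hvs, h2]
    rw [show (fun (st : PySem.Set String × List String) value =>
        if PySem.Set.contains st.1 (PySem.Str.lower value) then st
        else (PySem.Set.add st.1 (PySem.Str.lower value), st.2 ++ [value])) = pvDedupStepA from rfl]
    rw [hfold]
  have hmerge : pvMergeUnique R f vs = R.insert f (pvDedup (old ++ vs)) := by
    rw [hA, if_neg hne]
  have hkeys := pvKeys_of_rel R G hRG
  constructor
  · cases hc : PySem.Dict.contains G f with
    | true =>
      have hcR : PySem.Dict.contains R f = true := by
        rw [PySem.Dict.contains_eq_decide_mem_keys, hkeys,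
          ← PySem.Dict.contains_eq_decide_mem_keys]
        exact hc
      rw [hmerge, PySem.Dict.items_insert_of_contains _ _ hcR,
        PySem.Dict.items_insert_of_contains _ _ hc, hRG, List.map_map, List.map_map]
      have hfun : ((fun p => if (p.1 == f) = true then (f, pvDedup (old ++ vs)) else p) ∘ pvDM)
          = (pvDM ∘ fun p => if (p.1 == f) = true then (f, old ++ vs) else p) := by
        funext p
        by_cases hp : p.1 = f
        · simp [pvDM, hp]
        · simp [pvDM, hp]
      rw [hfun]
    | false =>
      have hcR : PySem.Dict.contains R f = false := by
        rw [PySem.Dict.contains_eq_decide_mem_keys, hkeys,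
          ← PySem.Dict.contains_eq_decide_mem_keys]
        exact hc
      rw [hmerge, PySem.Dict.items_insert_of_not_contains _ _ hcR,
        PySem.Dict.items_insert_of_not_contains _ _ hc, hRG, List.map_append]
      simp [pvDM]
  · intro k v hv
    rw [PySem.Dict.getD_insert] at hv
    by_cases hk : k = f
    · rw [if_pos hk] at hv
      rcases List.mem_append.mp hv with h | h
      · exact holdclean v h
      · exact hcv v h
    · rw [if_neg hk] at hv
      exact hG k v hv

-- the main loop correspondence
theorem pvLoop (items : List (String × List String))
    (hitems : ∀ p ∈ items, p.2 ≠ [] ∧ ∀ v ∈ p.2, pvClean v)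
    (R G : PySem.Dict String (List String)) (rep : List String)
    (hRG : R.items = G.items.map pvDM)
    (hG : ∀ k, ∀ v ∈ PySem.Dict.getD G k [], pvClean v) :
    (items.foldl pvStepA (R, rep)).1.items = (items.foldl pvStepG G).items.map pvDM ∧
    (items.foldl pvStepA (R, rep)).2 = rep ++ items.filterMap pvRepair := by
  induction items generalizing R G rep with
  | nil => exact ⟨hRG, by simp⟩
  | cons fv t ih =>
    have hfv := hitems fv (by simp)
    have ht : ∀ p ∈ t, p.2 ≠ [] ∧ ∀ v ∈ p.2, pvClean v := fun p hp => hitems p (by simp [hp])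
    rw [List.foldl_cons, List.foldl_cons, List.filterMap_cons]
    cases hT : PySem.Dict.get? pvCreatorRoleToAuthor (PySem.Str.lower fv.1) with
    | some target =>
      have hout : pvOutName fv.1 = target := by unfold pvOutName; rw [hT]; rfl
      have hA : pvStepA (R, rep) fv
          = (pvMergeUnique R target fv.2, rep ++ [fv.1 ++ "->" ++ target]) := by
        unfold pvStepA; rw [hT]
      have hGstep : pvStepG G fv
          = G.insert target (PySem.Dict.getD G target [] ++ fv.2) := by
        unfold pvStepG; rw [hout]
      have hrep : pvRepair fv = some (fv.1 ++ "->" ++ target) := by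
        unfold pvRepair; rw [hT]; rfl
      obtain ⟨hitems', hG'⟩ := pvMergeStep R G target fv.2 hfv.1 hfv.2 hRG hG
      rw [hA, hGstep, hrep]
      have hmm : (pvMergeUnique R target fv.2).items
          = (G.insert target (PySem.Dict.getD G target [] ++ fv.2)).items.map pvDM := hitems'
      obtain ⟨g1, g2⟩ := ih ht (pvMergeUnique R target fv.2)
        (G.insert target (PySem.Dict.getD G target [] ++ fv.2))
        (rep ++ [fv.1 ++ "->" ++ target]) hmm hG'
      exact ⟨g1, by rw [g2]; simp⟩
    | none =>
      have hout : pvOutName fv.1 = fv.1 := by unfold pvOutName; rw [hT]; rfl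
      have hA : pvStepA (R, rep) fv = (pvMergeUnique R fv.1 fv.2, rep) := by
        unfold pvStepA; rw [hT]
      have hGstep : pvStepG G fv
          = G.insert fv.1 (PySem.Dict.getD G fv.1 [] ++ fv.2) := by
        unfold pvStepG; rw [hout]
      have hrep : pvRepair fv = none := by unfold pvRepair; rw [hT]; rfl
      obtain ⟨hitems', hG'⟩ := pvMergeStep R G fv.1 fv.2 hfv.1 hfv.2 hRG hG
      rw [hA, hGstep, hrep]
      obtain ⟨g1, g2⟩ := ih ht (pvMergeUnique R fv.1 fv.2)
        (G.insert fv.1 (PySem.Dict.getD G fv.1 [] ++ fv.2)) rep hitems' hG'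
      exact ⟨g1, g2⟩

-- ===== VERDICT (by name: the statement is the Claim_ definition above) =====
theorem project_creator_role_fields_spec : Claim_equal_project_creator_role_fields := by
  intro filters _
  show project_creator_role_fields filters = project_creator_role_fields_alt filters
  have hB : project_creator_role_fields_alt filters =
      (((pvNormalizeA filters).items.foldl pvStepG PySem.Dict.empty).items.map pvDM,
       (pvNormalizeA filters).items.filterMap pvRepair) := by
    show (((((pvNormalizeB filters).items.map (fun fv =>
        ((PySem.Dict.get? pvCreatorRoleToAuthor (PySem.Str.lower fv.1)).getD fv.1, fv.2))).foldl
          (fun (g : PySem.Dict String (List String)) fv =>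
            g.insert fv.1 (g.getD fv.1 [] ++ fv.2)) PySem.Dict.empty).items.map
          (fun p => (p.1, pvDedupCasefold p.2))),
        ((pvNormalizeB filters).items.filterMap (fun fv =>
          (PySem.Dict.get? pvCreatorRoleToAuthor (PySem.Str.lower fv.1)).map
            (fun t => fv.1 ++ "->" ++ t)))) = _
    rw [pvNormalize_eq, List.foldl_map]
    rfl
  show ((((pvNormalizeA filters).items.foldl pvStepA (PySem.Dict.empty, [])).1.items,
         ((pvNormalizeA filters).items.foldl pvStepA (PySem.Dict.empty, [])).2) :
         (List (String × List String)) × List String)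
      = project_creator_role_fields_alt filters
  obtain ⟨g1, g2⟩ := pvLoop (pvNormalizeA filters).items (pvNorm_items filters)
    PySem.Dict.empty PySem.Dict.empty [] rfl
    (by intro k v hv; simp [PySem.Dict.getD_empty] at hv)
  rw [List.nil_append] at g2
  rw [hB, g1, g2]
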